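-- pv_equiv track=rewrite | github.com/Kenshin9977/shaolin-hangman-solver | main.py | remove_matching_words
-- ===== SOURCE A (Python) =====
-- from collections import defaultdict
--
-- def count_prefixes(strings):
--     prefix_count = defaultdict(int)
--     for string in strings:
--         for i in range(1, len(string) + 1):
--             prefix = string[:i]
--             prefix_count[prefix] += 1
--     return dict(
--         sorted(prefix_count.items(), key=lambda item: len(item[0]), reverse=True)
--     )
--
-- def remove_matching_words(list1, list2):
--     prefixes_list1 = count_prefixes(list1)
--     prefixes_list2 = count_prefixes(list2)
--     words_to_remove = set()
--
--     for prefix in prefixes_list1: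
--         if prefix in prefixes_list2:
--             list1_count_prefix = prefixes_list1[prefix]
--             list2_words_matching_prefix = [
--                 word for word in list2 if word.startswith(prefix)
--             ]
--             if len(list2_words_matching_prefix) >= list1_count_prefix:
--                 if list1_count_prefix >= len(list2_words_matching_prefix):
--                     words_to_remove.update(
--                         list2_words_matching_prefix[:list1_count_prefix]
--                     )
--
--     return [word for word in list2 if word not in words_to_remove]
-- ===== SOURCE B (Python) =====
-- def remove_matching_words(list1, list2):
--     def prefix_counts(words):
--         counts = {}
--         for w in words:
--             for i in range(1, len(w) + 1):
--                 p = w[:i]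
--                 counts[p] = counts.get(p, 0) + 1
--         return counts
--
--     c1 = prefix_counts(list1)
--     c2 = prefix_counts(list2)
--     # A word of list2 is removed iff one of its own prefixes has equal
--     # multiplicity as a prefix in list1 and in list2.
--     return [
--         w for w in list2
--         if not any(c1.get(w[:i], 0) == c2[w[:i]] for i in range(1, len(w) + 1))
--     ]
-- ===== Notes on version B (the rewrite author's own statement) =====
-- stated objective: faster
-- what changed: Instead of iterating over all list1 prefixes and re-scanning list2 for each one, B builds the two prefix-count dicts once and decides each list2 word locally by testing only its own prefixes for equal counts, eliminating the per-prefix scan of list2 and the sorting of the prefix dicts.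
import Mathlib
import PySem

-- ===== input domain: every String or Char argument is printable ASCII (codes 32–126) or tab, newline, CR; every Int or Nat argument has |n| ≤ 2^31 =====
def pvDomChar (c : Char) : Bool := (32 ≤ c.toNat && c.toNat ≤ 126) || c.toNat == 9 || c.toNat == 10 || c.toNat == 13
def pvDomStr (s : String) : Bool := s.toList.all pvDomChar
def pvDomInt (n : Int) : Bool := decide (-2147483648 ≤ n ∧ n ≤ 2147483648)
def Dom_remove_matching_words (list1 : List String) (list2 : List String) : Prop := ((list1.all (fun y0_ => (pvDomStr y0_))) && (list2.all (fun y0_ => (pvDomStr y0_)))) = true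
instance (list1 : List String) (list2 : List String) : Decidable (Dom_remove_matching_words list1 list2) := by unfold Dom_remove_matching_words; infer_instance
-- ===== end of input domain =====

-- B replaces A's per-prefix rescans of list2 (and the sorting of the prefix dicts) by two
-- prefix-count dicts built once, deciding each list2 word by its own prefixes (objective: faster).

-- ===== PORT A =====
-- count_prefixes: the defaultdict(int) double counting loop …
def pvCountLoopA (strings : List String) : PySem.Dict String Int :=
  strings.foldl (fun d s =>
    (PySem.List.pyRange 1 (PySem.Str.len s + 1)).foldl
      (fun d i => d.modify (PySem.Str.slice s none (some i)) 0 (· + 1)) d)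
    PySem.Dict.empty

-- … then dict(sorted(prefix_count.items(), key=lambda item: len(item[0]), reverse=True))
def count_prefixes (strings : List String) : PySem.Dict String Int :=
  PySem.Dict.ofList
    (PySem.List.sorted (pvCountLoopA strings).items (fun item => PySem.Str.len item.1) true)

def remove_matching_words (list1 : List String) (list2 : List String) : List String :=
  let prefixes_list1 := count_prefixes list1
  let prefixes_list2 := count_prefixes list2
  let words_to_remove :=
    prefixes_list1.keys.foldl (fun (s : PySem.Set String) pfx =>
      if prefixes_list2.contains pfx then
        -- prefixes_list1[pfx]: pfx is a key of prefixes_list1, so getD is exact here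
        let list1_count_prefix := prefixes_list1.getD pfx 0
        let list2_words_matching_prefix := list2.filter (fun word => PySem.Str.startswith word pfx)
        if (list2_words_matching_prefix.length : Int) ≥ list1_count_prefix then
          if list1_count_prefix ≥ (list2_words_matching_prefix.length : Int) then
            PySem.Set.update s (PySem.List.slice list2_words_matching_prefix none (some list1_count_prefix))
          else s
        else s
      else s) PySem.Set.empty
  list2.filter (fun word => !(PySem.Set.contains words_to_remove word))

-- ===== PORT B =====
-- prefix_counts: plain dict, counts[p] = counts.get(p, 0) + 1
def pvPrefixCounts (words : List String) : PySem.Dict String Int :=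
  words.foldl (fun d w =>
    (PySem.List.pyRange 1 (PySem.Str.len w + 1)).foldl
      (fun d i => d.insert (PySem.Str.slice w none (some i)) (d.getD (PySem.Str.slice w none (some i)) 0 + 1)) d)
    PySem.Dict.empty

def remove_matching_words_alt (list1 : List String) (list2 : List String) : List String :=
  let c1 := pvPrefixCounts list1
  let c2 := pvPrefixCounts list2
  -- c2[w[:i]]: w[:i] is a prefix of w ∈ list2, hence a key of c2, so getD is exact here
  list2.filter (fun w => !((PySem.List.pyRange 1 (PySem.Str.len w + 1)).any
    (fun i => c1.getD (PySem.Str.slice w none (some i)) 0 == c2.getD (PySem.Str.slice w none (some i)) 0)))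

-- ===== PRECONDITION & SPEC =====
def Spec_remove_matching_words (list1 : List String) (list2 : List String) (out : List String) : Prop := out = remove_matching_words_alt list1 list2
instance (list1 : List String) (list2 : List String) (out : List String) : Decidable (Spec_remove_matching_words list1 list2 out) := by unfold Spec_remove_matching_words; infer_instance

-- ===== CLAIM (what is proved, stated in full; the proofs are below) =====
def Claim_equal_remove_matching_words : Prop := ∀ (list1 : List String) (list2 : List String), Dom_remove_matching_words list1 list2 → Spec_remove_matching_words list1 list2 (remove_matching_words list1 list2)

-- ===== LEMMAS AND PROOFS =====

-- the multiset of nonempty prefixes of a word / of a list of words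
def pvPref (w : String) : List String :=
  (PySem.List.pyRange 1 (PySem.Str.len w + 1)).map (fun i => PySem.Str.slice w none (some i))

def pvL (xs : List String) : List String := xs.flatMap pvPref

-- a word-loop of prefix-loops is one fold over the concatenated prefix lists
lemma pvFoldPref (g : PySem.Dict String Int → String → PySem.Dict String Int) :
    ∀ (xs : List String) (d : PySem.Dict String Int),
      xs.foldl (fun d s =>
        (PySem.List.pyRange 1 (PySem.Str.len s + 1)).foldl
          (fun d i => g d (PySem.Str.slice s none (some i))) d) d
      = (pvL xs).foldl g d := by
  intro xs
  induction xs with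
  | nil => intro d; simp [pvL]
  | cons w xs ih =>
    intro d
    simp only [List.foldl_cons, pvL, List.flatMap_cons, List.foldl_append]
    have h : (PySem.List.pyRange 1 (PySem.Str.len w + 1)).foldl
        (fun d i => g d (PySem.Str.slice w none (some i))) d = (pvPref w).foldl g d := by
      rw [pvPref, List.foldl_map]
    rw [h, ih]
    rfl

-- both counting loops build Counter(pvL xs)
lemma pvCountLoopA_eq (xs : List String) :
    pvCountLoopA xs = PySem.Dict.counter (pvL xs) := by
  rw [PySem.Dict.counter_eq_foldl, pvCountLoopA, ← pvFoldPref (fun d x => d.modify x 0 (· + 1))]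

lemma pvPrefixCounts_eq (xs : List String) :
    pvPrefixCounts xs = PySem.Dict.counter (pvL xs) := by
  rw [← PySem.Dict.foldl_insert_getD_add_one_eq_counter, pvPrefixCounts,
    ← pvFoldPref (fun d x => d.insert x (d.getD x 0 + 1))]

lemma toList_pref (w : String) {i : Int} (h0 : 0 ≤ i) :
    (PySem.Str.slice w none (some i)).toList = w.toList.take i.toNat := by
  rw [PySem.Str.toList_slice, PySem.Chars.slice_eq_listSlice, PySem.List.slice_to _ h0]

lemma mem_pvPref {p w : String} :
    p ∈ pvPref w ↔ (p.toList <+: w.toList ∧ 1 ≤ p.toList.length) := by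
  constructor
  · intro h
    rw [pvPref, List.mem_map] at h
    obtain ⟨i, hi, rfl⟩ := h
    rw [PySem.List.mem_pyRange_one, PySem.Str.len_eq] at hi
    have h0 : 0 ≤ i := by omega
    have hle : i.toNat ≤ w.toList.length := by omega
    rw [toList_pref w h0]
    refine ⟨List.take_prefix _ _, ?_⟩
    rw [List.length_take]
    omega
  · rintro ⟨hpre, hlen⟩
    rw [pvPref, List.mem_map]
    refine ⟨(p.toList.length : Int), ?_, ?_⟩
    · rw [PySem.List.mem_pyRange_one, PySem.Str.len_eq]
      have := hpre.length_le
      omega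
    · apply String.toList_inj.mp
      rw [toList_pref w (by positivity)]
      simp only [Int.toNat_natCast]
      exact (List.prefix_iff_eq_take.mp hpre).symm

lemma nodup_pvPref (w : String) : (pvPref w).Nodup := by
  rw [pvPref]
  refine List.Nodup.map_on ?_ (PySem.List.nodup_pyRange_one 1 _)
  intro i hi j hj hij
  rw [PySem.List.mem_pyRange_one, PySem.Str.len_eq] at hi hj
  have := congrArg (fun s => s.toList.length) hij
  simp only [toList_pref w (by omega : (0:Int) ≤ i), toList_pref w (by omega : (0:Int) ≤ j),
    List.length_take] at this
  omega

lemma startswith_true_iff {w p : String} :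
    PySem.Str.startswith w p = true ↔ p.toList <+: w.toList := by
  rw [PySem.Str.startswith_eq, PySem.Chars.startswith_iff]

lemma count_pref {p : String} (hp : 1 ≤ p.toList.length) (w : String) :
    (pvPref w).count p = if PySem.Str.startswith w p then 1 else 0 := by
  by_cases h : PySem.Str.startswith w p = true
  · rw [if_pos h]
    exact List.count_eq_one_of_mem (nodup_pvPref w) (mem_pvPref.mpr ⟨startswith_true_iff.mp h, hp⟩)
  · rw [if_neg h, List.count_eq_zero]
    intro hmem
    exact h (startswith_true_iff.mpr (mem_pvPref.mp hmem).1)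

-- counting a fixed (nonempty) prefix over pvL = counting the words that start with it
lemma count_pvL {p : String} (hp : 1 ≤ p.toList.length) (xs : List String) :
    (pvL xs).count p = (xs.filter (fun w => PySem.Str.startswith w p)).length := by
  induction xs with
  | nil => simp [pvL]
  | cons w xs ih =>
    rw [pvL, List.flatMap_cons, List.count_append, List.filter_cons, ← pvL, ih, count_pref hp w]
    split_ifs <;> simp [Nat.add_comm]

-- dict(pairs) with distinct keys keeps exactly those pairs
lemma items_ofList_of_nodup {l : List (String × Int)} (h : (l.map Prod.fst).Nodup) :
    (PySem.Dict.ofList l).items = l := by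
  have := PySem.Dict.items_foldl_insert_fresh l Prod.fst Prod.snd PySem.Dict.empty
    (fun a _ => PySem.Dict.contains_empty _) h
  simpa using this

lemma nodup_fst_sorted (L : List String) :
    ((PySem.List.sorted (PySem.Dict.counter L).items (fun item => PySem.Str.len item.1) true).map Prod.fst).Nodup := by
  have hperm := (PySem.List.sorted_perm (PySem.Dict.counter L).items (fun item => PySem.Str.len item.1) true).map Prod.fst
  refine hperm.nodup_iff.mpr ?_
  rw [PySem.Dict.items_counter]
  simp only [List.map_map]
  have h : ((fun p : String × Int => p.1) ∘ fun k => (k, (L.count k : Int))) = id := rfl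
  rw [h, List.map_id]
  exact PySem.Set.nodup_ofList L

lemma mem_fst_sorted {p : String} (L : List String) :
    (p ∈ (PySem.List.sorted (PySem.Dict.counter L).items (fun item => PySem.Str.len item.1) true).map Prod.fst) ↔ p ∈ L := by
  have hperm := (PySem.List.sorted_perm (PySem.Dict.counter L).items (fun item => PySem.Str.len item.1) true).map Prod.fst
  rw [hperm.mem_iff, PySem.Dict.items_counter]
  simp only [List.map_map]
  have h : ((fun p : String × Int => p.1) ∘ fun k => (k, (L.count k : Int))) = id := rfl
  rw [h, List.map_id]
  exact PySem.Set.mem_ofList L p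

lemma items_count_prefixes (xs : List String) :
    (count_prefixes xs).items =
      PySem.List.sorted (PySem.Dict.counter (pvL xs)).items (fun item => PySem.Str.len item.1) true := by
  rw [count_prefixes, pvCountLoopA_eq]
  exact items_ofList_of_nodup (nodup_fst_sorted (pvL xs))

lemma keys_count_prefixes (xs : List String) :
    (count_prefixes xs).keys =
      (PySem.List.sorted (PySem.Dict.counter (pvL xs)).items (fun item => PySem.Str.len item.1) true).map Prod.fst := by
  simp only [PySem.Dict.keys, items_count_prefixes]

lemma nodup_keys_count_prefixes (xs : List String) : (count_prefixes xs).keys.Nodup := by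
  rw [keys_count_prefixes]
  exact nodup_fst_sorted (pvL xs)

lemma mem_keys_count_prefixes {p : String} (xs : List String) :
    p ∈ (count_prefixes xs).keys ↔ p ∈ pvL xs := by
  rw [keys_count_prefixes]
  exact mem_fst_sorted (pvL xs)

lemma getD_count_prefixes {p : String} {xs : List String} (hp : p ∈ pvL xs) :
    (count_prefixes xs).getD p 0 = ((pvL xs).count p : Int) := by
  refine PySem.Dict.getD_of_mem_items _ ?_ (nodup_keys_count_prefixes xs) 0
  rw [items_count_prefixes, PySem.List.mem_sorted, PySem.Dict.items_counter, List.mem_map]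
  exact ⟨p, (PySem.Set.mem_ofList _ p).mpr hp, rfl⟩

lemma contains_count_prefixes {p : String} (xs : List String) :
    (count_prefixes xs).contains p = true ↔ p ∈ pvL xs := by
  rw [PySem.Dict.contains_iff_mem_keys]
  exact mem_keys_count_prefixes xs

-- membership in an if/update fold
lemma mem_foldl_update {α : Type} [BEq α] [LawfulBEq α] (C : α → Bool) (F : α → List α)
    (keys : List α) (s0 : PySem.Set α) (w : α) :
    w ∈ keys.foldl (fun s p => if C p then PySem.Set.update s (F p) else s) s0 ↔
      w ∈ s0 ∨ ∃ p ∈ keys, C p = true ∧ w ∈ F p := by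
  induction keys generalizing s0 with
  | nil => simp
  | cons q keys ih =>
    rw [List.foldl_cons, ih]
    by_cases h : C q = true
    · rw [if_pos h, PySem.Set.mem_update]
      constructor
      · rintro (⟨hs | hf⟩ | ⟨p, hp, hc, hw⟩)
        · exact Or.inl hs
        · exact Or.inr ⟨q, List.mem_cons_self, h, hf⟩
        · exact Or.inr ⟨p, List.mem_cons_of_mem _ hp, hc, hw⟩
      · rintro (hs | ⟨p, hp, hc, hw⟩)
        · exact Or.inl (Or.inl hs)
        · rcases List.mem_cons.mp hp with rfl | hp
          · exact Or.inl (Or.inr hw)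
          · exact Or.inr ⟨p, hp, hc, hw⟩
    · rw [if_neg h]
      constructor
      · rintro (hs | ⟨p, hp, hc, hw⟩)
        · exact Or.inl hs
        · exact Or.inr ⟨p, List.mem_cons_of_mem _ hp, hc, hw⟩
      · rintro (hs | ⟨p, hp, hc, hw⟩)
        · exact Or.inl hs
        · rcases List.mem_cons.mp hp with rfl | hp
          · exact absurd hc h
          · exact Or.inr ⟨p, hp, hc, hw⟩

-- A's fold step, written as a single if/update step
lemma step_eq (p1 p2 : PySem.Dict String Int) (l2 : List String) :
    (fun (s : PySem.Set String) pfx =>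
      if p2.contains pfx then
        if ((l2.filter (fun word => PySem.Str.startswith word pfx)).length : Int) ≥ p1.getD pfx 0 then
          if p1.getD pfx 0 ≥ ((l2.filter (fun word => PySem.Str.startswith word pfx)).length : Int) then
            PySem.Set.update s (PySem.List.slice (l2.filter (fun word => PySem.Str.startswith word pfx)) none (some (p1.getD pfx 0)))
          else s
        else s
      else s)
    = (fun s pfx =>
        if (p2.contains pfx &&
            (decide (((l2.filter (fun word => PySem.Str.startswith word pfx)).length : Int) ≥ p1.getD pfx 0) &&
             decide (p1.getD pfx 0 ≥ ((l2.filter (fun word => PySem.Str.startswith word pfx)).length : Int)))) then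
          PySem.Set.update s (PySem.List.slice (l2.filter (fun word => PySem.Str.startswith word pfx)) none (some (p1.getD pfx 0)))
        else s) := by
  funext s pfx
  split_ifs with h1 h2 h3 h4 <;> first | rfl | (exfalso; simp_all; try omega)

-- the full slice taken by A is the whole matching list
lemma slice_full (m : List String) : PySem.List.slice m none (some ((m.length : Nat) : Int)) = m := by
  rw [PySem.List.slice_to_natCast, List.take_length]

-- the two removal conditions agree on every word of list2
lemma removal_iff (l1 l2 : List String) {w : String} (hw : w ∈ l2) :
    (∃ p ∈ (count_prefixes l1).keys,
        ((count_prefixes l2).contains p &&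
          (decide (((l2.filter (fun word => PySem.Str.startswith word p)).length : Int) ≥ (count_prefixes l1).getD p 0) &&
           decide ((count_prefixes l1).getD p 0 ≥ ((l2.filter (fun word => PySem.Str.startswith word p)).length : Int)))) = true ∧
        w ∈ PySem.List.slice (l2.filter (fun word => PySem.Str.startswith word p)) none
              (some ((count_prefixes l1).getD p 0)))
    ↔ ∃ q ∈ pvPref w, (pvL l1).count q = (pvL l2).count q := by
  constructor
  · rintro ⟨p, hkeys, hcond, hslice⟩
    simp only [Bool.and_eq_true, decide_eq_true_eq] at hcond
    obtain ⟨hc2, hge, hle⟩ := hcond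
    have hp1 : p ∈ pvL l1 := (mem_keys_count_prefixes l1).mp hkeys
    have hp2 : p ∈ pvL l2 := (contains_count_prefixes l2).mp hc2
    have hlen : 1 ≤ p.toList.length := by
      obtain ⟨u, _, hu⟩ := List.mem_flatMap.mp hp2
      exact (mem_pvPref.mp hu).2
    have hd1 : (count_prefixes l1).getD p 0 = ((pvL l1).count p : Int) := getD_count_prefixes hp1
    have hcnt2 : (pvL l2).count p = (l2.filter (fun word => PySem.Str.startswith word p)).length :=
      count_pvL hlen l2
    have heq : (pvL l1).count p = (l2.filter (fun word => PySem.Str.startswith word p)).length := by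
      rw [hd1] at hge hle
      exact_mod_cast (le_antisymm hle hge).symm
    rw [hd1, heq] at hslice
    rw [slice_full] at hslice
    have hsw : PySem.Str.startswith w p = true := (List.mem_filter.mp hslice).2
    refine ⟨p, mem_pvPref.mpr ⟨startswith_true_iff.mp hsw, hlen⟩, ?_⟩
    rw [heq, hcnt2]
  · rintro ⟨q, hq, hcnt⟩
    obtain ⟨hpre, hlen⟩ := mem_pvPref.mp hq
    have hq2 : q ∈ pvL l2 := List.mem_flatMap.mpr ⟨w, hw, hq⟩
    have hpos2 : 0 < (pvL l2).count q := List.count_pos_iff.mpr hq2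
    have hq1 : q ∈ pvL l1 := List.count_pos_iff.mp (by omega)
    have hd1 : (count_prefixes l1).getD q 0 = ((pvL l1).count q : Int) := getD_count_prefixes hq1
    have hcnt2 : (pvL l2).count q = (l2.filter (fun word => PySem.Str.startswith word q)).length :=
      count_pvL hlen l2
    refine ⟨q, (mem_keys_count_prefixes l1).mpr hq1, ?_, ?_⟩
    · simp only [Bool.and_eq_true, decide_eq_true_eq]
      refine ⟨(contains_count_prefixes l2).mpr hq2, ?_, ?_⟩ <;> rw [hd1, hcnt, hcnt2]
    · rw [hd1, hcnt, hcnt2, slice_full]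
      exact List.mem_filter.mpr ⟨hw, startswith_true_iff.mpr hpre⟩

-- B's any over the prefix indices = an existential over pvPref
lemma exists_pref (w : String) (P : String → Prop) :
    (∃ i ∈ PySem.List.pyRange 1 (PySem.Str.len w + 1), P (PySem.Str.slice w none (some i))) ↔
      ∃ q ∈ pvPref w, P q := by
  simp only [pvPref, List.mem_map]
  constructor
  · rintro ⟨i, hi, h⟩
    exact ⟨_, ⟨i, hi, rfl⟩, h⟩
  · rintro ⟨q, ⟨i, hi, rfl⟩, h⟩
    exact ⟨i, hi, h⟩

-- ===== VERDICT (by name: the statement is the Claim_ definition above) =====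
theorem remove_matching_words_spec : Claim_equal_remove_matching_words := by
  intro l1 l2 _
  unfold Spec_remove_matching_words
  simp only [remove_matching_words, remove_matching_words_alt]
  refine List.filter_congr ?_
  intro w hw
  congr 1
  rw [Bool.eq_iff_iff, PySem.Set.contains_iff, step_eq, mem_foldl_update]
  simp only [PySem.Set.empty, List.not_mem_nil, false_or]
  rw [removal_iff l1 l2 hw, List.any_eq_true]
  rw [exists_pref w (fun q => ((pvPrefixCounts l1).getD q 0 == (pvPrefixCounts l2).getD q 0) = true)]
  refine exists_congr fun i => and_congr_right fun _ => ?_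
  rw [pvPrefixCounts_eq, pvPrefixCounts_eq, PySem.Dict.getD_counter, PySem.Dict.getD_counter,
    beq_iff_eq, Int.natCast_inj]
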